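-- pv_equiv track=rewrite | github.com/Fafer77/AI | SI/lista2/manhattan_zad3.py | manhattan_preprocess
-- ===== SOURCE A (Python) =====
-- from typing import List
--
-- def manhattan_preprocess(maze: List[List[str]], goal_points: List[tuple[int, int]]) -> List[List[int]]:
--     height = len(maze)
--     width = len(maze[0])
--
--     heuristic_maze = [[-1 for _ in range(width)] for _ in range(height)]
--     for i in range(height):
--         for j in range(width):
--             if maze[i][j] != '#':
--                 best_candidate = min(abs(i - x) + abs(j - y) for (x, y) in goal_points)
--                 heuristic_maze[i][j] = best_candidate
--
--     return heuristic_maze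
-- ===== SOURCE B (Python) =====
-- from typing import List
--
-- def _relax(vals):
--     # one-directional relaxation: each value may improve from its left neighbour + 1
--     out = []
--     prev = None
--     for v in vals:
--         if prev is not None and (v is None or prev + 1 < v):
--             v = prev + 1
--         out.append(v)
--         prev = v
--     return out
--
-- def manhattan_preprocess(maze: List[List[str]], goal_points: List[tuple[int, int]]) -> List[List[int]]:
--     height = len(maze)
--     width = len(maze[0])
--     if width == 0:
--         return [[] for _ in range(height)]
--     result = []
--     for i in range(height):
--         # seed each column with the cheapest goal whose column clamps to it,
--         # then two sweeps give min Manhattan distance per column in O(width + goals)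
--         row = [None] * width
--         for (x, y) in goal_points:
--             c = 0 if y < 0 else (width - 1 if y >= width else y)
--             cost = abs(i - x) + abs(c - y)
--             if row[c] is None or cost < row[c]:
--                 row[c] = cost
--         row = _relax(row)
--         row = _relax(row[::-1])[::-1]
--         result.append([row[j] if maze[i][j] != '#' else -1 for j in range(width)])
--     return result
-- ===== Notes on version B (the rewrite author's own statement) =====
-- stated objective: faster
-- what changed: Replaces the per-cell scan over all goals by a per-row 1D distance transform: goals are seeded into their clamped column with their row-distance cost, and two linear relaxation sweeps (left-to-right, right-to-left) yield the minimum Manhattan distance for every column.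
import Mathlib
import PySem

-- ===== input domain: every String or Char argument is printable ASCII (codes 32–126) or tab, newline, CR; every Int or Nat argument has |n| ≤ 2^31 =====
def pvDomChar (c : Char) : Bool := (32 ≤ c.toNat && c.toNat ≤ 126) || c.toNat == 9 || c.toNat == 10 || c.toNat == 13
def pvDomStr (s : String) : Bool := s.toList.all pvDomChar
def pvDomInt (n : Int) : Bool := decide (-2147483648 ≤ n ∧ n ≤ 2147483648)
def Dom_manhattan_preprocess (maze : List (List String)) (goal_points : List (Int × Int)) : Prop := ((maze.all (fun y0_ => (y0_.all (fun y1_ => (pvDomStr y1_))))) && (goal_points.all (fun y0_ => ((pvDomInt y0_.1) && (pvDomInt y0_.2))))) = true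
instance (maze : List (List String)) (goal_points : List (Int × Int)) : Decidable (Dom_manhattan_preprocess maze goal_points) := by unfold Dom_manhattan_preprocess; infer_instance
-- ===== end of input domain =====

-- B replaces A's per-cell scan over all goals by a per-row seeded two-sweep distance
-- transform (objective: faster — fewer operations when there are many goals).

-- ===== PORT A =====
-- min(generator) over a nonempty sequence: first element, then fold of two-argument min
def pyMinList : List Int → Int
  | [] => 0          -- unreachable under Pre_ (Python's min raises ValueError on an empty sequence)
  | a :: rest => rest.foldl min a

def manhattan_preprocess (maze : List (List String)) (goal_points : List (Int × Int)) : List (List Int) :=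
  let height := maze.length
  let width := ((PySem.List.pyGet? maze 0).getD []).length
  -- the -1-initialised grid with in-place assignment becomes a map producing -1 on the '#' branch
  (List.range height).map (fun (i : Nat) =>
    (List.range width).map (fun (j : Nat) =>
      let cell := (PySem.List.pyGet? ((PySem.List.pyGet? maze (i : Int)).getD []) (j : Int)).getD ""
      if cell ≠ "#" then
        pyMinList (goal_points.map (fun p => |(i : Int) - p.1| + |(j : Int) - p.2|))
      else -1))

-- ===== PORT B =====
-- Optional Int = Python's None-or-int cell value during the transform
def omin2 : Option Int → Option Int → Option Int
  | none, b => b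
  | some a, none => some a
  | some a, some b => some (min a b)

-- _relax from Source B: one left-to-right sweep, prev carried through the loop
def relaxGo (prev : Option Int) : List (Option Int) → List (Option Int)
  | [] => []
  | v :: rest =>
      let w := omin2 v (prev.map (· + 1))
      w :: relaxGo w rest

def relax (vals : List (Option Int)) : List (Option Int) := relaxGo none vals

def clampCol (y : Int) (width : Nat) : Nat :=
  if y < 0 then 0 else if (width : Int) ≤ y then width - 1 else y.toNat

def seedRow (i : Int) (width : Nat) (gps : List (Int × Int)) : List (Option Int) :=
  gps.foldl (fun row p =>
      let c := clampCol p.2 width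
      let cost := |i - p.1| + |(c : Int) - p.2|
      row.set c (omin2 (row.getD c none) (some cost)))
    (List.replicate width none)

def manhattan_preprocess_alt (maze : List (List String)) (goal_points : List (Int × Int)) : List (List Int) :=
  let height := maze.length
  let width := ((PySem.List.pyGet? maze 0).getD []).length
  if width = 0 then (List.range height).map (fun _ => ([] : List Int))
  else
    (List.range height).map (fun (i : Nat) =>
      let row0 := seedRow (i : Int) width goal_points
      let row1 := relax row0
      let row2 := (relax row1.reverse).reverse   -- row[::-1] relaxed, reversed back
      (List.range width).map (fun (j : Nat) =>
        let cell := (PySem.List.pyGet? ((PySem.List.pyGet? maze (i : Int)).getD []) (j : Int)).getD ""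
        if cell ≠ "#" then (row2.getD j none).getD 0 else -1))

-- ===== PRECONDITION & SPEC =====
-- Pre_ is exact: A raises IndexError on an empty maze or on a row shorter than the first row,
-- and ValueError (min of empty sequence) when goal_points is empty and some cell is not '#'.
def Pre_manhattan_preprocess (maze : List (List String)) (goal_points : List (Int × Int)) : Prop :=
  maze ≠ [] ∧
  (∀ row ∈ maze, (maze.headD []).length ≤ row.length) ∧
  (goal_points ≠ [] ∨ ∀ row ∈ maze, ∀ j < (maze.headD []).length, row.getD j "" = "#")

instance (maze : List (List String)) (goal_points : List (Int × Int)) : Decidable (Pre_manhattan_preprocess maze goal_points) := by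
  unfold Pre_manhattan_preprocess; infer_instance

def pvWitness_manhattan_preprocess : List (List String) × (List (Int × Int)) :=
  ([[".", "#"], [".", "."]], [(0, 1)])

def Spec_manhattan_preprocess (maze : List (List String)) (goal_points : List (Int × Int)) (out : List (List Int)) : Prop := out = manhattan_preprocess_alt maze goal_points
instance (maze : List (List String)) (goal_points : List (Int × Int)) (out : List (List Int)) : Decidable (Spec_manhattan_preprocess maze goal_points out) := by unfold Spec_manhattan_preprocess; infer_instance

-- ===== CLAIM (what is proved, stated in full; the proofs are below) =====
def Claim_equal_manhattan_preprocess : Prop := ∀ (maze : List (List String)) (goal_points : List (Int × Int)), Dom_manhattan_preprocess maze goal_points → Pre_manhattan_preprocess maze goal_points → Spec_manhattan_preprocess maze goal_points (manhattan_preprocess maze goal_points)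

-- ===== LEMMAS AND PROOFS =====

-- ---- omin2 / shift algebra ----
def oshift (a : Option Int) (d : Nat) : Option Int := a.map (· + (d : Int))

theorem omin2_none_right (a : Option Int) : omin2 a none = a := by cases a <;> rfl
theorem omin2_none_left (a : Option Int) : omin2 none a = a := rfl
theorem omin2_comm (a b : Option Int) : omin2 a b = omin2 b a := by
  cases a <;> cases b <;> simp [omin2, min_comm]
theorem omin2_assoc (a b c : Option Int) : omin2 (omin2 a b) c = omin2 a (omin2 b c) := by
  cases a <;> cases b <;> cases c <;> simp [omin2, min_assoc]
theorem omin2_left_comm (a b c : Option Int) : omin2 a (omin2 b c) = omin2 b (omin2 a c) := by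
  rw [← omin2_assoc, omin2_comm a b, omin2_assoc]
theorem oshift_none (d : Nat) : oshift none d = none := rfl
theorem oshift_zero (a : Option Int) : oshift a 0 = a := by cases a <;> simp [oshift]
theorem oshift_oshift (a : Option Int) (d e : Nat) : oshift (oshift a d) e = oshift a (d + e) := by
  cases a <;> simp [oshift]; ring
theorem oshift_omin2 (a b : Option Int) (d : Nat) :
    oshift (omin2 a b) d = omin2 (oshift a d) (oshift b d) := by
  cases a <;> cases b <;> simp [omin2, oshift, min_add_add_right]
theorem omin2_self_shift (a : Option Int) (d : Nat) : omin2 a (oshift a d) = a := by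
  cases a <;> simp [omin2, oshift]
theorem omin2_absorb (a b : Option Int) (d : Nat) : omin2 a (omin2 (oshift a d) b) = omin2 a b := by
  rw [← omin2_assoc, omin2_self_shift]
theorem omin2_absorb' (a g s : Option Int) (d : Nat) :
    omin2 a (omin2 (omin2 (oshift a d) g) s) = omin2 a (omin2 g s) := by
  rw [omin2_assoc, omin2_absorb]
theorem map_add_one (a : Option Int) : a.map (· + 1) = oshift a 1 := by
  cases a <;> simp [oshift]

-- ---- prefix / suffix minima ----
-- pm l j = min over k ≤ j of l[k] + (j - k)
def pm : List (Option Int) → Nat → Option Int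
  | [], _ => none
  | v :: _, 0 => v
  | v :: rest, (j+1) => omin2 (oshift v (j+1)) (pm rest j)

-- sm l j = min over k ≥ j of l[k] + (k - j)
def sm : List (Option Int) → Nat → Option Int
  | [], _ => none
  | v :: rest, 0 => omin2 v (oshift (sm rest 0) 1)
  | _ :: rest, (j+1) => sm rest j

-- mf l j = min over all k of l[k] + |j - k|
def mf : List (Option Int) → Int → Option Int
  | [], _ => none
  | v :: rest, j => omin2 (oshift v j.natAbs) (mf rest (j - 1))

theorem relaxGo_length (prev : Option Int) (l : List (Option Int)) :
    (relaxGo prev l).length = l.length := by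
  induction l generalizing prev with
  | nil => rfl
  | cons v rest ih => simp [relaxGo, ih]

theorem relaxGo_getD (l : List (Option Int)) (prev : Option Int) (j : Nat) (h : j < l.length) :
    (relaxGo prev l).getD j none = omin2 (oshift prev (j+1)) (pm l j) := by
  induction l generalizing prev j with
  | nil => simp at h
  | cons v rest ih =>
      cases j with
      | zero =>
          simp only [relaxGo, List.getD_cons_zero, pm, map_add_one]
          rw [omin2_comm]
      | succ j =>
          have hj : j < rest.length := by simpa using h
          simp only [relaxGo, List.getD_cons_succ, map_add_one]
          rw [ih _ _ hj]
          simp only [pm]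
          rw [oshift_omin2, oshift_oshift, Nat.add_comm 1 (j+1)]
          rw [omin2_assoc, omin2_left_comm]

theorem relax_getD (l : List (Option Int)) (j : Nat) (h : j < l.length) :
    (relax l).getD j none = pm l j := by
  rw [relax, relaxGo_getD l none j h]; rfl

theorem pm_zero (l : List (Option Int)) (h : 0 < l.length) : pm l 0 = l.getD 0 none := by
  cases l with
  | nil => simp at h
  | cons v rest => rfl

theorem pm_append_left (a b : List (Option Int)) (j : Nat) (h : j < a.length) :
    pm (a ++ b) j = pm a j := by
  induction a generalizing j with
  | nil => simp at h
  | cons v rest ih =>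
      cases j with
      | zero => rfl
      | succ j =>
          have hj : j < rest.length := by simpa using h
          simp only [List.cons_append, pm, ih j hj]

theorem pm_cons_last (v : Option Int) (a : List (Option Int)) :
    pm (v :: a) a.length = omin2 (oshift v a.length) (pm a (a.length - 1)) := by
  cases a with
  | nil => simp [pm, oshift_zero, omin2_none_right]
  | cons w a' =>
      show pm (v :: w :: a') (a'.length + 1) = _
      simp only [pm, List.length_cons, Nat.add_sub_cancel]

theorem pm_append_right (a b : List (Option Int)) (j : Nat) :
    pm (a ++ b) (a.length + j) = omin2 (oshift (pm a (a.length - 1)) (j+1)) (pm b j) := by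
  induction a with
  | nil => simp [pm, oshift_none, omin2_none_left]
  | cons v a' ih =>
      have hidx : (v :: a').length + j = (a'.length + j) + 1 := by simp; omega
      rw [hidx, List.cons_append]
      show omin2 (oshift v (a'.length + j + 1)) (pm (a' ++ b) (a'.length + j)) = _
      rw [ih]
      rw [show (v :: a').length - 1 = a'.length by simp]
      rw [pm_cons_last, oshift_omin2, oshift_oshift, omin2_assoc]
      have harr : a'.length + (j + 1) = a'.length + j + 1 := by omega
      rw [harr]

theorem pm_reverse (l : List (Option Int)) (j : Nat) (h : j < l.length) :
    pm l.reverse (l.length - 1 - j) = sm l j := by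
  induction l generalizing j with
  | nil => simp at h
  | cons v rest ih =>
      cases j with
      | zero =>
          have hidx : (v :: rest).length - 1 - 0 = rest.reverse.length + 0 := by simp
          rw [hidx, List.reverse_cons, pm_append_right]
          cases hr : rest with
          | nil => subst hr; simp [pm, sm, oshift_none, omin2_none_right, omin2_none_left]
          | cons w rest' =>
              have hr0 : 0 < rest.length := by rw [hr]; simp
              have := ih 0 (by omega)
              rw [show rest.length - 1 - 0 = rest.reverse.length - 1 by simp] at this
              rw [← hr] at *
              rw [this]
              simp [pm, sm, omin2_comm]
      | succ j =>
          have hj : j < rest.length := by simpa using h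
          have hidx : (v :: rest).length - 1 - (j+1) = rest.length - 1 - j := by simp; omega
          rw [hidx, List.reverse_cons]
          rw [pm_append_left _ _ _ (by simp; omega)]
          rw [ih j hj]
          rfl

theorem sm_oob (l : List (Option Int)) (j : Nat) (h : l.length ≤ j) : sm l j = none := by
  induction l generalizing j with
  | nil => rfl
  | cons v rest ih =>
      cases j with
      | zero => simp at h
      | succ j => exact ih j (by simpa using h)

theorem sm_succ_struct (l : List (Option Int)) (j : Nat) (h : j < l.length) :
    sm l j = omin2 (l.getD j none) (oshift (sm l (j+1)) 1) := by
  induction l generalizing j with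
  | nil => simp at h
  | cons v rest ih =>
      cases j with
      | zero => rfl
      | succ j =>
          have hj : j < rest.length := by simpa using h
          simpa [sm] using ih j hj

theorem pm_succ (l : List (Option Int)) (j : Nat) (h : j + 1 < l.length) :
    pm l (j+1) = omin2 (oshift (pm l j) 1) (l.getD (j+1) none) := by
  induction l generalizing j with
  | nil => simp at h
  | cons v rest ih =>
      cases j with
      | zero =>
          have hr : 0 < rest.length := by simpa using h
          simp only [pm, List.getD_cons_succ]
          rw [pm_zero rest hr, omin2_comm]
      | succ j =>
          have hj : j + 1 < rest.length := by simpa using h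
          simp only [pm, List.getD_cons_succ]
          rw [ih j hj, oshift_omin2, oshift_oshift, omin2_assoc]

theorem sm_relax (l : List (Option Int)) (j : Nat) (h : j < l.length) :
    sm (relax l) j = omin2 (pm l j) (oshift (sm l (j+1)) 1) := by
  have hlen : (relax l).length = l.length := relaxGo_length none l
  -- downward induction on l.length - 1 - j
  induction hd : l.length - 1 - j generalizing j with
  | zero =>
      -- j is the last index
      have hj : j + 1 = l.length := by omega
      rw [sm_succ_struct (relax l) j (by omega), relax_getD l j h]
      rw [sm_oob (relax l) (j+1) (by omega), sm_oob l (j+1) (by omega)]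
  | succ d ih =>
      have hj1 : j + 1 < l.length := by omega
      rw [sm_succ_struct (relax l) j (by omega), relax_getD l j h]
      rw [ih (j+1) hj1 (by omega)]
      rw [pm_succ l j hj1]
      rw [sm_succ_struct l (j+1) hj1]
      rw [oshift_omin2, oshift_omin2, oshift_omin2, oshift_oshift, oshift_oshift]
      rw [omin2_absorb']

theorem mf_neg (l : List (Option Int)) (d : Nat) (hd : 0 < d) :
    mf l (-(d : Int)) = oshift (sm l 0) d := by
  induction l generalizing d with
  | nil => simp [mf, sm, oshift_none]
  | cons v rest ih =>
      have h1 : (-(d:Int)).natAbs = d := by simp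
      have h2 : (-(d:Int)) - 1 = -(((d+1 : Nat)) : Int) := by push_cast; ring
      simp only [mf, h1, h2]
      rw [ih (d+1) (by omega)]
      rw [show sm (v :: rest) 0 = omin2 v (oshift (sm rest 0) 1) from rfl]
      rw [oshift_omin2, oshift_oshift]
      congr 2
      omega

theorem mf_eq (l : List (Option Int)) (j : Nat) (h : j < l.length) :
    mf l (j : Int) = omin2 (pm l j) (oshift (sm l (j+1)) 1) := by
  induction l generalizing j with
  | nil => simp at h
  | cons v rest ih =>
      cases j with
      | zero =>
          simp only [mf]
          rw [show ((0:Nat):Int) - 1 = -((1:Nat):Int) by norm_num]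
          rw [mf_neg rest 1 (by omega)]
          simp [pm, sm, oshift_zero]
      | succ j =>
          have hj : j < rest.length := by simpa using h
          simp only [mf]
          rw [show (((j+1:Nat)):Int) - 1 = (j : Int) by push_cast; ring]
          rw [ih j hj]
          rw [show sm (v :: rest) (j+1+1) = sm rest (j+1) from rfl]
          rw [show pm (v :: rest) (j+1) = omin2 (oshift v (j+1)) (pm rest j) from rfl]
          rw [omin2_assoc]
          have hnat : ((((j + 1 : Nat)) : Int)).natAbs = j + 1 := by omega
          rw [hnat]

theorem mf_set (l : List (Option Int)) (c : Nat) (v : Int) (j : Int) (h : c < l.length) :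
    mf (l.set c (omin2 (l.getD c none) (some v))) j = omin2 (mf l j) (some (v + |j - (c : Int)|)) := by
  induction l generalizing c j with
  | nil => simp at h
  | cons w rest ih =>
      cases c with
      | zero =>
          simp only [List.set_cons_zero, List.getD_cons_zero, mf]
          rw [oshift_omin2]
          rw [show oshift (some v) j.natAbs = some (v + |j - (0:Int)|) by
            simp only [oshift, Option.map_some, Option.some.injEq]
            rw [show |j - (0:Int)| = |j| by norm_num, Int.natCast_natAbs]]
          rw [omin2_assoc, omin2_comm (some (v + |j - (0:Int)|)) (mf rest (j-1)), ← omin2_assoc]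
          norm_num
      | succ c =>
          have hc : c < rest.length := by simpa using h
          simp only [List.set_cons_succ, List.getD_cons_succ, mf]
          rw [ih c (j-1) hc]
          rw [← omin2_assoc]
          have harr : j - 1 - (c : Int) = j - (((c+1 : Nat) : Int)) := by push_cast; ring
          rw [harr]

theorem mf_replicate (n : Nat) (j : Int) : mf (List.replicate n none) j = none := by
  induction n generalizing j with
  | zero => rfl
  | succ n ih => simp [mf, List.replicate_succ, oshift_none, ih, omin2_none_left]

theorem clampCol_lt (y : Int) (width : Nat) (hw : 0 < width) : clampCol y width < width := by
  unfold clampCol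
  split_ifs with h1 h2
  · omega
  · omega
  · have : y.toNat < width := by omega
    exact this

theorem clamp_dist (y : Int) (width j : Nat) (hj : j < width) :
    |(clampCol y width : Int) - y| + |(j : Int) - (clampCol y width : Int)| = |(j : Int) - y| := by
  unfold clampCol
  split_ifs with h1 h2
  · simp only [Nat.cast_zero]
    rw [abs_of_nonneg (by omega : (0:Int) ≤ 0 - y), abs_of_nonneg (by omega : (0:Int) ≤ (j:Int) - 0),
        abs_of_nonneg (by omega : (0:Int) ≤ (j:Int) - y)]
    ring
  · have hcast : (((width - 1 : Nat)) : Int) = (width : Int) - 1 := by omega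
    rw [hcast]
    rw [abs_of_nonpos (by omega : ((width:Int) - 1 - y) ≤ 0), abs_of_nonpos (by omega : ((j:Int) - ((width:Int) - 1)) ≤ 0),
        abs_of_nonpos (by omega : ((j:Int) - y) ≤ 0)]
    ring
  · have hcast : ((y.toNat : Int)) = y := by omega
    rw [hcast]
    simp

theorem seed_mf (gps : List (Int × Int)) (r : List (Option Int)) (i : Int) (width : Nat)
    (hw : 0 < width) (hr : r.length = width) (j : Nat) (hj : j < width) :
    mf (gps.foldl (fun row p =>
      row.set (clampCol p.2 width) (omin2 (row.getD (clampCol p.2 width) none)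
        (some (|i - p.1| + |((clampCol p.2 width : Nat) : Int) - p.2|)))) r) (j : Int)
    = gps.foldl (fun acc p => omin2 acc (some (|i - p.1| + |(j : Int) - p.2|))) (mf r (j : Int)) := by
  induction gps generalizing r with
  | nil => rfl
  | cons p rest ih =>
      simp only [List.foldl_cons]
      rw [ih _ (by simp [hr])]
      congr 1
      rw [mf_set r (clampCol p.2 width) _ (j : Int) (by rw [hr]; exact clampCol_lt p.2 width hw)]
      congr 2
      have := clamp_dist p.2 width j hj
      omega

theorem fold_some (rest : List (Int × Int)) (f : Int × Int → Int) (a : Int) :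
    rest.foldl (fun acc p => omin2 acc (some (f p))) (some a) = some ((rest.map f).foldl min a) := by
  induction rest generalizing a with
  | nil => rfl
  | cons p rest ih => simp only [List.foldl_cons, List.map_cons]; rw [← ih]; rfl

theorem foldl_set_length (i : Int) (width : Nat) (l : List (Int × Int)) (r : List (Option Int)) :
    (l.foldl (fun row p =>
      row.set (clampCol p.2 width) (omin2 (row.getD (clampCol p.2 width) none)
        (some (|i - p.1| + |((clampCol p.2 width : Nat) : Int) - p.2|)))) r).length = r.length := by
  induction l generalizing r with
  | nil => rfl
  | cons q rest ih => rw [List.foldl_cons, ih]; simp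

theorem seedRow_length (i : Int) (width : Nat) (gps : List (Int × Int)) :
    (seedRow i width gps).length = width := by
  unfold seedRow
  rw [foldl_set_length]
  simp

-- B's row value equals A's per-cell minimum, for nonempty goals
theorem row_value (i : Int) (width : Nat) (hw : 0 < width) (gps : List (Int × Int)) (hg : gps ≠ [])
    (j : Nat) (hj : j < width) :
    (((relax (relax (seedRow i width gps)).reverse).reverse).getD j none)
      = some (pyMinList (gps.map (fun p => |i - p.1| + |(j : Int) - p.2|))) := by
  set row0 := seedRow i width gps with hrow0
  have h0 : row0.length = width := seedRow_length i width gps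
  have h1 : (relax row0).length = width := by rw [relax, relaxGo_length, h0]
  have h2 : (relax (relax row0).reverse).length = width := by
    rw [relax, relaxGo_length, List.length_reverse, h1]
  -- reverse indexing
  have hgetd : ((relax (relax row0).reverse).reverse).getD j none
      = (relax (relax row0).reverse).getD (width - 1 - j) none := by
    rw [List.getD_eq_getElem _ _ (by rw [List.length_reverse, h2]; exact hj)]
    rw [List.getElem_reverse]
    rw [List.getD_eq_getElem _ _ (by omega)]
    congr 1
    omega
  rw [hgetd]
  rw [relax_getD _ _ (by rw [List.length_reverse, h1]; omega)]
  have hpr : pm (relax row0).reverse (width - 1 - j) = sm (relax row0) j := by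
    have := pm_reverse (relax row0) j (by omega)
    rwa [h1] at this
  rw [hpr]
  rw [sm_relax row0 j (by omega)]
  rw [← mf_eq row0 j (by omega)]
  rw [hrow0]
  unfold seedRow
  rw [seed_mf gps (List.replicate width none) i width hw (by simp) j hj]
  rw [mf_replicate]
  cases gps with
  | nil => exact absurd rfl hg
  | cons p rest =>
      simp only [List.foldl_cons, omin2_none_left, List.map_cons, pyMinList]
      exact fold_some rest _ _

-- ===== VERDICT (by name: the statement is the Claim_ definition above) =====
theorem manhattan_preprocess_spec : Claim_equal_manhattan_preprocess := by
  intro maze gps _hdom hpre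
  obtain ⟨hne, hrows, hgoals⟩ := hpre
  unfold Spec_manhattan_preprocess
  simp only [manhattan_preprocess, manhattan_preprocess_alt]
  have hhead : (PySem.List.pyGet? maze 0).getD [] = maze.headD [] := by
    cases maze with
    | nil => exact absurd rfl hne
    | cons r rest => simp
  by_cases hw : (maze.headD []).length = 0
  · rw [hhead, if_pos hw]
    apply List.map_congr_left
    intro i _
    rw [hw]
    simp
  · rw [hhead, if_neg hw]
    apply List.map_congr_left
    intro i hi
    have hi' : i < maze.length := List.mem_range.mp hi
    apply List.map_congr_left
    intro j hj
    have hj' : j < (maze.headD []).length := List.mem_range.mp hj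
    have hrowlen : (maze.headD []).length ≤ maze[i].length :=
      hrows maze[i] (List.getElem_mem hi')
    have hcell2 : (PySem.List.pyGet? ((PySem.List.pyGet? maze (i : Int)).getD []) (j : Int)).getD ""
        = maze[i].getD j "" := by
      simp only [PySem.List.pyGet?_natCast, List.getElem?_eq_getElem hi', Option.getD_some,
        ← List.getD_eq_getElem?_getD]
    rw [hcell2]
    by_cases hc : maze[i].getD j "" = "#"
    · have hc' : maze[i][j]?.getD "" = "#" := by rw [← List.getD_eq_getElem?_getD]; exact hc
      rw [if_neg (by simp [hc']), if_neg (by simp [hc'])]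
    · have hg : gps ≠ [] := by
        rcases hgoals with hg | hall
        · exact hg
        · exact absurd (hall maze[i] (List.getElem_mem hi') j hj') hc
      rw [if_pos hc, if_pos hc]
      rw [row_value (i : Int) (maze.headD []).length (by omega) gps hg j hj']
      rfl
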